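-- pv_equiv track=rewrite | github.com/LautaroChioli/UBA | python/Guia 7/ej1.py | secuencia_ordenada_mas_larga
-- ===== SOURCE A (Python) =====
-- def secuencia_ordenada_mas_larga(s: list) -> int:
--     len_max = 1
--     len_actual = 1
--     inicio_actual = 0
--     inicio_max = 0
--
--     for i in range(1, len(s)):
--         if s[i] >= s[i - 1]:
--             len_actual += 1
--         else:
--             len_actual = 1
--             inicio_actual = i
--
--         if len_actual > len_max:
--             len_max = len_actual
--             inicio_max = inicio_actual
--
--     return inicio_max
-- ===== SOURCE B (Python) =====
-- def secuencia_ordenada_mas_larga(s: list) -> int: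
--     if not s:
--         return 0
--     runs = []
--     start = 0
--     for i in range(1, len(s)):
--         if s[i] < s[i - 1]:
--             runs.append((start, i - start))
--             start = i
--     runs.append((start, len(s) - start))
--     return max(runs, key=lambda r: r[1])[0]
-- ===== Notes on version B (the rewrite author's own statement) =====
-- stated objective: alternative
-- what changed: Instead of maintaining running current/best length counters inside one loop, B first partitions the list into maximal non-decreasing runs as (start, length) pairs and then takes the first run of maximal length with max(key=len), which preserves A's earliest-tie behaviour; empty input returns 0 like A.
import Mathlib
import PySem

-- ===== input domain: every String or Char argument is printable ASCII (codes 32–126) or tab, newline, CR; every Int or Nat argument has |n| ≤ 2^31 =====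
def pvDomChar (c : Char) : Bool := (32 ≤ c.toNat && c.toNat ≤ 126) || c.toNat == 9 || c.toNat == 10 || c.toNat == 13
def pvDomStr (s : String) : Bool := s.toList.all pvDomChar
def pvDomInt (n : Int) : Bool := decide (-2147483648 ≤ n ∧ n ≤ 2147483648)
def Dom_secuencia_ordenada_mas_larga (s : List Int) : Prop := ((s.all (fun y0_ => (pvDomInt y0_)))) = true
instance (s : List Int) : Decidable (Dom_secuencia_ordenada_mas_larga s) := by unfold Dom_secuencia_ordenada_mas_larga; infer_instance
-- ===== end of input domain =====

-- B partitions the list into maximal non-decreasing runs and takes the first longest run's start, instead of A's running current/best counters; same return values, no speed claim.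


-- ===== PORT A =====
-- loop body of A: state = (len_max, len_actual, inicio_actual, inicio_max)
def pvStepA (s : List Int) (st : Int × Int × Int × Int) (i : Int) : Int × Int × Int × Int :=
  let lm := st.1; let la := st.2.1; let ia := st.2.2.1; let im := st.2.2.2
  let p : Int × Int :=
    if PySem.List.pyGetD s (i - 1) 0 ≤ PySem.List.pyGetD s i 0 then (la + 1, ia) else (1, i)
  if lm < p.1 then (p.1, p.1, p.2, p.2) else (lm, p.1, p.2, im)

def secuencia_ordenada_mas_larga (s : List Int) : Int :=
  ((PySem.List.pyRange 1 (s.length : Int) 1).foldl (pvStepA s) (1, 1, 0, 0)).2.2.2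

-- ===== PORT B =====
-- loop body of B: state = (runs, start)
def pvStepB (s : List Int) (st : List (Int × Int) × Int) (i : Int) : List (Int × Int) × Int :=
  if PySem.List.pyGetD s i 0 < PySem.List.pyGetD s (i - 1) 0 then (st.1 ++ [(st.2, i - st.2)], i) else st

def pvRuns (s : List Int) : List (Int × Int) :=
  let st := (PySem.List.pyRange 1 (s.length : Int) 1).foldl (pvStepB s) ([], 0)
  st.1 ++ [(st.2, (s.length : Int) - st.2)]

def secuencia_ordenada_mas_larga_alt (s : List Int) : Int :=
  if s = [] then 0
  else
    match PySem.List.max? (pvRuns s) (fun r => r.2) with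
    | some r => r.1
    | none => 0

-- ===== PRECONDITION & SPEC =====
def Spec_secuencia_ordenada_mas_larga (s : List Int) (out : Int) : Prop := out = secuencia_ordenada_mas_larga_alt s
instance (s : List Int) (out : Int) : Decidable (Spec_secuencia_ordenada_mas_larga s out) := by unfold Spec_secuencia_ordenada_mas_larga; infer_instance

-- ===== CLAIM (what is proved, stated in full; the proofs are below) =====
def Claim_equal_secuencia_ordenada_mas_larga : Prop := ∀ (s : List Int), Dom_secuencia_ordenada_mas_larga s → Spec_secuencia_ordenada_mas_larga s (secuencia_ordenada_mas_larga s)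

-- ===== LEMMAS AND PROOFS =====

-- A's state, reconstructed from B's state after processing indices 1..i-1
def pvAbstr (i : Int) (b : List (Int × Int) × Int) : Int × Int × Int × Int :=
  match PySem.List.max? (b.1 ++ [(b.2, i - b.2)]) (fun r => r.2) with
  | some m => (m.2, i - b.2, b.2, m.1)
  | none => (1, 1, 0, 0)

theorem pv_max?_snoc (xs : List (Int × Int)) (y : Int × Int) :
    PySem.List.max? (xs ++ [y]) (fun r => r.2) =
      match PySem.List.max? xs (fun r => r.2) with
      | none => some y
      | some m => if m.2 < y.2 then some y else some m := by
  cases h : PySem.List.max? xs (fun r => r.2) with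
  | none =>
    have hx : xs = [] := (PySem.List.max?_eq_none_iff _ _).mp h
    subst hx
    rfl
  | some m =>
    unfold PySem.List.max? at h ⊢
    rw [List.foldl_append, h]
    rfl

theorem pv_step (s : List Int) (i : Int) (b : List (Int × Int) × Int) (hb : b.2 ≤ i - 1) :
    pvStepA s (pvAbstr i b) i = pvAbstr (i + 1) (pvStepB s b i) ∧ (pvStepB s b i).2 ≤ i := by
  obtain ⟨runs, st⟩ := b
  simp only at hb
  by_cases hc : PySem.List.pyGetD s i 0 < PySem.List.pyGetD s (i - 1) 0
  · -- new run begins at i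
    have hM : ∀ m, PySem.List.max? (runs ++ [(st, i - st)]) (fun r => r.2) = some m →
        i - st ≤ m.2 := by
      intro m hm
      exact PySem.List.max?_isMax hm (st, i - st) (by simp)
    constructor
    · unfold pvAbstr pvStepB pvStepA
      simp only [hc, if_true]
      cases hMm : PySem.List.max? (runs ++ [(st, i - st)]) (fun r => r.2) with
      | none => exact absurd ((PySem.List.max?_eq_none_iff _ _).mp hMm) (by simp)
      | some m =>
        have h1 : 1 ≤ m.2 := le_trans (by omega) (hM m hMm)
        rw [pv_max?_snoc]
        simp only [hMm]
        have : ¬ m.2 < i + 1 - i := by omega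
        simp only [this, if_false, not_le.mpr hc, if_false]
        have : ¬ m.2 < (1 : Int) := by omega
        simp only [this, if_false]
        have : i + 1 - i = (1 : Int) := by omega
        simp [this]
    · simp [pvStepB, hc]
  · -- current run extends
    constructor
    · unfold pvAbstr pvStepB pvStepA
      simp only [hc, if_false, not_lt.mp hc, if_true]
      rw [pv_max?_snoc, pv_max?_snoc]
      cases hR : PySem.List.max? runs (fun r => r.2) with
      | none =>
        simp only []
        have h1 : i - st + 1 = i + 1 - st := by omega
        have h2 : i - st < i - st + 1 := by omega
        simp [h1]
      | some rm =>
        simp only []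
        by_cases h1 : rm.2 < i - st
        · have h2 : rm.2 < i + 1 - st := by omega
          have h3 : i - st < i - st + 1 := by omega
          have h4 : i - st + 1 = i + 1 - st := by omega
          simp [h1, h2, h4]
        · by_cases h2 : rm.2 < i + 1 - st
          · -- rm.2 = i - st : the partial run now strictly beats the old max
            have h3 : rm.2 < i - st + 1 := by omega
            simp [h1, h2, h3]
            omega
          · have h3 : ¬ rm.2 < i - st + 1 := by omega
            simp [h1, h2, h3]
            omega
    · simp only [pvStepB, hc, if_false]
      omega

theorem pv_loop (s : List Int) (j : Nat) :
    ((PySem.List.pyRange 1 (1 + (j : Int)) 1).foldl (pvStepA s) (1, 1, 0, 0)) =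
      pvAbstr (1 + (j : Int)) ((PySem.List.pyRange 1 (1 + (j : Int)) 1).foldl (pvStepB s) ([], 0))
    ∧ ((PySem.List.pyRange 1 (1 + (j : Int)) 1).foldl (pvStepB s) ([], 0)).2 ≤ (j : Int) := by
  induction j with
  | zero =>
    rw [PySem.List.pyRange_one_eq_nil (by omega)]
    constructor
    · simp [pvAbstr, PySem.List.max?]
    · simp
  | succ n ih =>
    have hk : (1 : Int) + ((n + 1 : Nat) : Int) = (1 + (n : Int)) + 1 := by push_cast; ring
    rw [hk, PySem.List.pyRange_one_succ_right (by omega), List.foldl_append, List.foldl_append]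
    simp only [List.foldl]
    have hstep := pv_step s (1 + (n : Int))
      ((PySem.List.pyRange 1 (1 + (n : Int)) 1).foldl (pvStepB s) ([], 0)) (by omega)
    constructor
    · rw [ih.1, hstep.1]
    · have := hstep.2
      omega

-- ===== VERDICT (by name: the statement is the Claim_ definition above) =====
theorem secuencia_ordenada_mas_larga_spec : Claim_equal_secuencia_ordenada_mas_larga := by
  intro s _
  unfold Spec_secuencia_ordenada_mas_larga
  by_cases hs : s = []
  · subst hs
    rfl
  · have hlen : 1 ≤ s.length := List.length_pos_iff.mpr hs
    have hcast : (1 : Int) + ((s.length - 1 : Nat) : Int) = (s.length : Int) := by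
      push_cast [hlen]; ring
    have h := pv_loop s (s.length - 1)
    rw [hcast] at h
    unfold secuencia_ordenada_mas_larga secuencia_ordenada_mas_larga_alt pvRuns
    simp only [hs, if_false]
    rw [h.1]
    unfold pvAbstr
    cases hMm : PySem.List.max?
        ((((PySem.List.pyRange 1 (s.length : Int) 1).foldl (pvStepB s) ([], 0)).1) ++
          [(((PySem.List.pyRange 1 (s.length : Int) 1).foldl (pvStepB s) ([], 0)).2,
            (s.length : Int) - ((PySem.List.pyRange 1 (s.length : Int) 1).foldl (pvStepB s) ([], 0)).2)])
        (fun r => r.2) with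
    | none => exact absurd ((PySem.List.max?_eq_none_iff _ _).mp hMm) (by simp)
    | some m => simp
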